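-- pv_equiv track=rewrite | github.com/NetDevAutomate/socratic-study-mentor | packages/studyctl/src/studyctl/tui/sidebar.py | _pomodoro_state
-- ===== SOURCE A (Python) =====
-- POMODORO_FOCUS = 25 * 60
--
-- POMODORO_SHORT_BREAK = 5 * 60
--
-- POMODORO_LONG_BREAK = 15 * 60
--
-- POMODORO_CYCLE_LENGTH = 4  # long break after this many focus blocks
--
-- def _pomodoro_state(elapsed_secs: int) -> tuple[str, int, int, int]:
--     """Compute pomodoro state from total elapsed seconds.
--
--     Returns:
--         (phase, remaining_secs, cycle_number, block_in_cycle)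
--         phase: "focus" | "short_break" | "long_break"
--         remaining_secs: seconds left in current phase
--         cycle_number: which full cycle (1-based)
--         block_in_cycle: which focus block within the cycle (1-4)
--     """
--     # One full cycle = 4x(focus + short_break) - last short_break + long_break
--     # = 4*25 + 3*5 + 15 = 130 min
--     single_block = POMODORO_FOCUS + POMODORO_SHORT_BREAK  # 30 min
--     full_cycle = (single_block * POMODORO_CYCLE_LENGTH) - POMODORO_SHORT_BREAK + POMODORO_LONG_BREAK
--
--     cycle_number = elapsed_secs // full_cycle + 1
--     pos_in_cycle = elapsed_secs % full_cycle
--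
--     # Walk through the blocks in the cycle
--     for block_idx in range(POMODORO_CYCLE_LENGTH):
--         # Focus phase
--         if pos_in_cycle < POMODORO_FOCUS:
--             remaining = POMODORO_FOCUS - pos_in_cycle
--             return ("focus", remaining, cycle_number, block_idx + 1)
--         pos_in_cycle -= POMODORO_FOCUS
--
--         # Break phase (short for blocks 1-3, long for block 4)
--         if block_idx < POMODORO_CYCLE_LENGTH - 1:
--             if pos_in_cycle < POMODORO_SHORT_BREAK:
--                 remaining = POMODORO_SHORT_BREAK - pos_in_cycle
--                 return ("short_break", remaining, cycle_number, block_idx + 1)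
--             pos_in_cycle -= POMODORO_SHORT_BREAK
--         else:
--             if pos_in_cycle < POMODORO_LONG_BREAK:
--                 remaining = POMODORO_LONG_BREAK - pos_in_cycle
--                 return ("long_break", remaining, cycle_number, block_idx + 1)
--             pos_in_cycle -= POMODORO_LONG_BREAK
--
--     # Shouldn't reach here, but safety: start a new focus
--     return ("focus", POMODORO_FOCUS, cycle_number + 1, 1)
-- ===== SOURCE B (Python) =====
-- POMODORO_FOCUS = 25 * 60
-- POMODORO_SHORT_BREAK = 5 * 60
-- POMODORO_LONG_BREAK = 15 * 60
-- POMODORO_CYCLE_LENGTH = 4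
--
-- _BLOCK = POMODORO_FOCUS + POMODORO_SHORT_BREAK  # half an hour
-- _FULL_CYCLE = _BLOCK * POMODORO_CYCLE_LENGTH - POMODORO_SHORT_BREAK + POMODORO_LONG_BREAK  # one full cycle
--
-- def _pomodoro_state(elapsed_secs: int) -> tuple[str, int, int, int]:
--     cycle_number = elapsed_secs // _FULL_CYCLE + 1
--     pos = elapsed_secs % _FULL_CYCLE
--     # Closed form, no scan: the first three blocks are uniform half-hour
--     # (focus + short_break) blocks, so the block and offset are obtained
--     # directly with // and %; only the final 40-min tail is special.
--     if pos < _BLOCK * (POMODORO_CYCLE_LENGTH - 1):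
--         block = pos // _BLOCK + 1
--         within = pos % _BLOCK
--         if within < POMODORO_FOCUS:
--             return ("focus", POMODORO_FOCUS - within, cycle_number, block)
--         return ("short_break", _BLOCK - within, cycle_number, block)
--     within = pos - _BLOCK * (POMODORO_CYCLE_LENGTH - 1)
--     if within < POMODORO_FOCUS:
--         return ("focus", POMODORO_FOCUS - within, cycle_number, POMODORO_CYCLE_LENGTH)
--     return ("long_break", POMODORO_FOCUS + POMODORO_LONG_BREAK - within,
--             cycle_number, POMODORO_CYCLE_LENGTH)
-- ===== Notes on version B (the rewrite author's own statement) =====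
-- stated objective: alternative
-- what changed: Replaces A's loop that scans through the cycle's segments subtracting durations by a closed-form computation: the first three half-hour (focus+short_break) blocks are uniform, so block and offset come directly from // and % by the block length, with one special case for the final focus+long-break tail.
import Mathlib
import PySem

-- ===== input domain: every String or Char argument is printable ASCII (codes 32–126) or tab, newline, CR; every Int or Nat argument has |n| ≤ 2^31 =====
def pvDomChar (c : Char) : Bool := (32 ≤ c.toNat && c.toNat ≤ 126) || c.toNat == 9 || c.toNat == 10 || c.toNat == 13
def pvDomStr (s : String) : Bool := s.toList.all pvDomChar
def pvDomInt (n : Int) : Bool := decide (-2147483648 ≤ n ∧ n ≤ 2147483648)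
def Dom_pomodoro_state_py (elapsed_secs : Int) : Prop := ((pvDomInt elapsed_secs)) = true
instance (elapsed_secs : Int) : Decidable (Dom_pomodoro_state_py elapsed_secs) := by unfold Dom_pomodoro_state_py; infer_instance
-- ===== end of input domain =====

-- B replaces A's subtract-and-scan over cycle segments by closed-form // and % arithmetic on the uniform half-hour blocks (objective: alternative).


-- ===== PORT A =====
def POMODORO_FOCUS : Int := 25 * 60
def POMODORO_SHORT_BREAK : Int := 5 * 60
def POMODORO_LONG_BREAK : Int := 15 * 60
def POMODORO_CYCLE_LENGTH : Int := 4

-- the 'for block_idx in range(...)' loop with early returns, as an Option-returning recursion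
def pomodoroLoopA (blocks : List Int) (pos_in_cycle : Int) (cycle_number : Int) :
    Option (String × Int × Int × Int) :=
  match blocks with
  | [] => none
  | block_idx :: rest =>
    if pos_in_cycle < POMODORO_FOCUS then
      some ("focus", POMODORO_FOCUS - pos_in_cycle, cycle_number, block_idx + 1)
    else
      let pos1 := pos_in_cycle - POMODORO_FOCUS
      if block_idx < POMODORO_CYCLE_LENGTH - 1 then
        if pos1 < POMODORO_SHORT_BREAK then
          some ("short_break", POMODORO_SHORT_BREAK - pos1, cycle_number, block_idx + 1)
        else pomodoroLoopA rest (pos1 - POMODORO_SHORT_BREAK) cycle_number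
      else
        if pos1 < POMODORO_LONG_BREAK then
          some ("long_break", POMODORO_LONG_BREAK - pos1, cycle_number, block_idx + 1)
        else pomodoroLoopA rest (pos1 - POMODORO_LONG_BREAK) cycle_number

def pomodoro_state_py (elapsed_secs : Int) : String × Int × Int × Int :=
  let single_block := POMODORO_FOCUS + POMODORO_SHORT_BREAK
  let full_cycle := single_block * POMODORO_CYCLE_LENGTH - POMODORO_SHORT_BREAK + POMODORO_LONG_BREAK
  let cycle_number := PySem.Int.floordiv elapsed_secs full_cycle + 1
  let pos_in_cycle := PySem.Int.mod elapsed_secs full_cycle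
  match pomodoroLoopA (PySem.List.pyRange 0 POMODORO_CYCLE_LENGTH 1) pos_in_cycle cycle_number with
  | some r => r
  | none => ("focus", POMODORO_FOCUS, cycle_number + 1, 1)

-- ===== PORT B =====
def BLOCK : Int := POMODORO_FOCUS + POMODORO_SHORT_BREAK
def FULL_CYCLE : Int := BLOCK * POMODORO_CYCLE_LENGTH - POMODORO_SHORT_BREAK + POMODORO_LONG_BREAK

def pomodoro_state_py_alt (elapsed_secs : Int) : String × Int × Int × Int :=
  let cycle_number := PySem.Int.floordiv elapsed_secs FULL_CYCLE + 1
  let pos := PySem.Int.mod elapsed_secs FULL_CYCLE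
  if pos < BLOCK * (POMODORO_CYCLE_LENGTH - 1) then
    let block := PySem.Int.floordiv pos BLOCK + 1
    let within := PySem.Int.mod pos BLOCK
    if within < POMODORO_FOCUS then
      ("focus", POMODORO_FOCUS - within, cycle_number, block)
    else
      ("short_break", BLOCK - within, cycle_number, block)
  else
    let within := pos - BLOCK * (POMODORO_CYCLE_LENGTH - 1)
    if within < POMODORO_FOCUS then
      ("focus", POMODORO_FOCUS - within, cycle_number, POMODORO_CYCLE_LENGTH)
    else
      ("long_break", POMODORO_FOCUS + POMODORO_LONG_BREAK - within, cycle_number, POMODORO_CYCLE_LENGTH)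

-- ===== PRECONDITION & SPEC =====
def Spec_pomodoro_state_py (elapsed_secs : Int) (out : String × Int × Int × Int) : Prop := out = pomodoro_state_py_alt elapsed_secs
instance (elapsed_secs : Int) (out : String × Int × Int × Int) : Decidable (Spec_pomodoro_state_py elapsed_secs out) := by unfold Spec_pomodoro_state_py; infer_instance

-- ===== CLAIM (what is proved, stated in full; the proofs are below) =====
def Claim_equal_pomodoro_state_py : Prop := ∀ (elapsed_secs : Int), Dom_pomodoro_state_py elapsed_secs → Spec_pomodoro_state_py elapsed_secs (pomodoro_state_py elapsed_secs)

-- ===== LEMMAS AND PROOFS =====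
-- On 0 ≤ p < 7800, A's segment scan and B's closed-form arithmetic agree.
set_option maxHeartbeats 1000000 in
theorem loopA_eq_closed (p c : Int) (h0 : 0 ≤ p) (h1 : p < 7800) :
    (match pomodoroLoopA (PySem.List.pyRange 0 POMODORO_CYCLE_LENGTH 1) p c with
      | some r => r
      | none => ("focus", POMODORO_FOCUS, c + 1, 1)) =
    (if p < BLOCK * (POMODORO_CYCLE_LENGTH - 1) then
       if PySem.Int.mod p BLOCK < POMODORO_FOCUS then
         ("focus", POMODORO_FOCUS - PySem.Int.mod p BLOCK, c, PySem.Int.floordiv p BLOCK + 1)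
       else
         ("short_break", BLOCK - PySem.Int.mod p BLOCK, c, PySem.Int.floordiv p BLOCK + 1)
     else
       if p - BLOCK * (POMODORO_CYCLE_LENGTH - 1) < POMODORO_FOCUS then
         ("focus", POMODORO_FOCUS - (p - BLOCK * (POMODORO_CYCLE_LENGTH - 1)), c, POMODORO_CYCLE_LENGTH)
       else
         ("long_break", POMODORO_FOCUS + POMODORO_LONG_BREAK - (p - BLOCK * (POMODORO_CYCLE_LENGTH - 1)), c,
           POMODORO_CYCLE_LENGTH)) := by
  have hr : PySem.List.pyRange 0 POMODORO_CYCLE_LENGTH 1 = [0, 1, 2, 3] := by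
    simp [POMODORO_CYCLE_LENGTH, PySem.List.pyRange_one, List.range_succ]
  have hd : PySem.Int.floordiv p 1800 = p / 1800 :=
    PySem.Int.floordiv_eq_ediv_of_pos (by norm_num)
  have hm : PySem.Int.mod p 1800 = p % 1800 :=
    PySem.Int.mod_eq_emod_of_pos (by norm_num)
  rw [hr]
  simp only [pomodoroLoopA,
    POMODORO_FOCUS, POMODORO_SHORT_BREAK, POMODORO_LONG_BREAK, POMODORO_CYCLE_LENGTH, BLOCK]
  norm_num
  split_ifs <;> simp only [Prod.mk.injEq] <;>
    first
      | exact ⟨trivial, by omega, trivial, by omega⟩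
      | exact ⟨trivial, by omega, trivial⟩
      | (exfalso; omega)

-- ===== VERDICT (by name: the statement is the Claim_ definition above) =====
theorem pomodoro_state_py_spec : Claim_equal_pomodoro_state_py := by
  intro e _
  unfold Spec_pomodoro_state_py pomodoro_state_py pomodoro_state_py_alt
  have hfc : ((POMODORO_FOCUS + POMODORO_SHORT_BREAK) * POMODORO_CYCLE_LENGTH
      - POMODORO_SHORT_BREAK + POMODORO_LONG_BREAK) = FULL_CYCLE := rfl
  have hm : PySem.Int.mod e FULL_CYCLE = e % 7800 :=
    PySem.Int.mod_eq_emod_of_pos (by norm_num [FULL_CYCLE, BLOCK, POMODORO_FOCUS,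
      POMODORO_SHORT_BREAK, POMODORO_LONG_BREAK, POMODORO_CYCLE_LENGTH])
  have h0 : 0 ≤ e % 7800 := Int.emod_nonneg e (by norm_num)
  have h1 : e % 7800 < 7800 := Int.emod_lt_of_pos e (by norm_num)
  simp only [hfc, hm]
  exact loopA_eq_closed (e % 7800) (PySem.Int.floordiv e FULL_CYCLE + 1) h0 h1
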